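-- pv_equiv track=rewrite | github.com/shrinking-corp/algorithms | src/shrinking_algorithms/parsers/puml_interpreter/filtered_structure.py | _filter_attributes
-- ===== SOURCE A (Python) =====
-- def _filter_attributes(source_attributes: list, target_attributes: list) -> list:
--     allowed = {
--         (attr.get("name"), attr.get("visibility"))
--         for attr in target_attributes
--     }
--     return [
--         attr
--         for attr in source_attributes
--         if (attr.get("name"), attr.get("visibility")) in allowed
--     ]
-- ===== SOURCE B (Python) =====
-- def _filter_attributes(source_attributes: list, target_attributes: list) -> list:
--     # Inverted traversal: for each target pair, sweep the sources and mark
--     # matching positions; then emit the marked sources in their original order.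
--     keep = [False] * len(source_attributes)
--     for t in target_attributes:
--         key = (t.get("name"), t.get("visibility"))
--         for i, attr in enumerate(source_attributes):
--             if not keep[i] and (attr.get("name"), attr.get("visibility")) == key:
--                 keep[i] = True
--     return [attr for attr, k in zip(source_attributes, keep) if k]
-- ===== Notes on version B (the rewrite author's own statement) =====
-- stated objective: alternative
-- what changed: Inverts the loop nesting: instead of precomputing a set of target keys and filtering sources in one pass, B sweeps the sources once per target pair, maintaining a boolean mark array, and finally emits the marked sources in order.
import Mathlib
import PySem

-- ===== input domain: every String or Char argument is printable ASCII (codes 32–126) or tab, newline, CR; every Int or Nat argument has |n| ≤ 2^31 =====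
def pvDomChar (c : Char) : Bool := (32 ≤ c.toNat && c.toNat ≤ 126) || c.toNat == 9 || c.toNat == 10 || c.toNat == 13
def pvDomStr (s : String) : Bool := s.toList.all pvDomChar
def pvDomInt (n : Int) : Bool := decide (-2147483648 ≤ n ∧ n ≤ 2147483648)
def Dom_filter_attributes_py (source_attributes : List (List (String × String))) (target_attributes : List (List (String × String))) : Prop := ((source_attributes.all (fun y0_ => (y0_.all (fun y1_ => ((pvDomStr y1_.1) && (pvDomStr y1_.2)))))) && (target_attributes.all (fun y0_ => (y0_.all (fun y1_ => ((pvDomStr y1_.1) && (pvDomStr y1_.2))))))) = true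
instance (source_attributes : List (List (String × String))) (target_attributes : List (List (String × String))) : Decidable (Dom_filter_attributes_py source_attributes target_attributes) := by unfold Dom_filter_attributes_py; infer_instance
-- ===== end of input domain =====

-- B inverts the traversal (mark array swept per target pair instead of A's set-then-filter);
-- same return value on the whole domain, no mutation of the arguments.

-- ===== PORT A =====
-- attr.get(k): first-match lookup in the association list (PySem.Dict.get?)
def pvGetA (attr : List (String × String)) (k : String) : Option String :=
  (PySem.Dict.mk attr).get? k

def filter_attributes_py (source_attributes : List (List (String × String))) (target_attributes : List (List (String × String))) : List (List (String × String)) :=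
  let allowed : PySem.Set (Option String × Option String) :=
    PySem.Set.ofList (target_attributes.map (fun attr => (pvGetA attr "name", pvGetA attr "visibility")))
  source_attributes.filter (fun attr => allowed.contains (pvGetA attr "name", pvGetA attr "visibility"))

-- ===== PORT B =====
-- (attr.get("name"), attr.get("visibility"))
def pvKeyB (attr : List (String × String)) : Option String × Option String :=
  ((PySem.Dict.mk attr).get? "name", (PySem.Dict.mk attr).get? "visibility")

-- the inner sweep: 'for i, attr in enumerate(source): if not keep[i] and key matches: keep[i] = True'
def pvSweepB (source_attributes : List (List (String × String))) (keep : List Bool) (key : Option String × Option String) : List Bool :=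
  (source_attributes.zip keep).map (fun p => if !p.2 && (pvKeyB p.1 == key) then true else p.2)

def filter_attributes_py_alt (source_attributes : List (List (String × String))) (target_attributes : List (List (String × String))) : List (List (String × String)) :=
  let keep0 : List Bool := List.replicate source_attributes.length false
  let keep := target_attributes.foldl (fun keep t => pvSweepB source_attributes keep (pvKeyB t)) keep0
  ((source_attributes.zip keep).filter (fun p => p.2)).map (fun p => p.1)

-- ===== PRECONDITION & SPEC =====
def Spec_filter_attributes_py (source_attributes : List (List (String × String))) (target_attributes : List (List (String × String))) (out : List (List (String × String))) : Prop := out = filter_attributes_py_alt source_attributes target_attributes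
instance (source_attributes : List (List (String × String))) (target_attributes : List (List (String × String))) (out : List (List (String × String))) : Decidable (Spec_filter_attributes_py source_attributes target_attributes out) := by unfold Spec_filter_attributes_py; infer_instance

-- ===== CLAIM =====
def Claim_equal_filter_attributes_py : Prop := ∀ (source_attributes : List (List (String × String))) (target_attributes : List (List (String × String))), Dom_filter_attributes_py source_attributes target_attributes → Spec_filter_attributes_py source_attributes target_attributes (filter_attributes_py source_attributes target_attributes)

-- ===== LEMMAS AND PROOFS =====

-- one sweep on a marks-list of the form s.map f just OR-s the match into each mark
theorem pv_sweep_map (s : List (List (String × String))) (f : List (String × String) → Bool) (key : Option String × Option String) :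
    pvSweepB s (s.map f) key = s.map (fun a => f a || (pvKeyB a == key)) := by
  induction s with
  | nil => rfl
  | cons a s ih =>
    simp only [pvSweepB, List.map, List.zip_cons_cons] at *
    rw [ih]
    congr 1
    cases h : f a <;> simp [BEq.beq]

-- folding the sweeps over the targets marks exactly the sources whose key occurs among the targets
theorem pv_fold_sweep (ts s : List (List (String × String))) (f : List (String × String) → Bool) :
    ts.foldl (fun keep t => pvSweepB s keep (pvKeyB t)) (s.map f)
      = s.map (fun a => f a || ts.any (fun t => pvKeyB a == pvKeyB t)) := by
  induction ts generalizing f with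
  | nil => simp
  | cons t ts ih =>
    simp only [List.foldl_cons, pv_sweep_map, ih, List.any_cons]
    apply List.map_congr_left
    intro a _
    cases h : pvKeyB a == pvKeyB t <;> simp

-- reading the marked sources back off is a filter
theorem pv_zip_map_filter (s : List (List (String × String))) (g : List (String × String) → Bool) :
    ((s.zip (s.map g)).filter (fun p => p.2)).map (fun p => p.1) = s.filter g := by
  induction s with
  | nil => rfl
  | cons a s ih =>
    simp only [List.map, List.zip_cons_cons, List.filter_cons]
    cases h : g a <;> simp [h, ih]

-- membership in A's precomputed set equals the existence of a matching target key
theorem pv_contains_eq_any (ts : List (List (String × String))) (attr : List (String × String)) :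
    (PySem.Set.ofList (ts.map (fun t => (pvGetA t "name", pvGetA t "visibility")))).contains
        (pvGetA attr "name", pvGetA attr "visibility")
    = ts.any (fun t => pvKeyB attr == pvKeyB t) := by
  rw [Bool.eq_iff_iff]
  simp only [List.any_eq_true, beq_iff_eq, pvGetA, pvKeyB]
  aesop

-- ===== VERDICT =====
theorem filter_attributes_py_spec : Claim_equal_filter_attributes_py := by
  intro s t _
  unfold Spec_filter_attributes_py filter_attributes_py filter_attributes_py_alt
  simp only []
  have hrep : List.replicate s.length false = s.map (fun _ => false) := by
    simp [List.map_const']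
  rw [hrep, pv_fold_sweep, pv_zip_map_filter]
  exact List.filter_congr (fun attr _ => by
    rw [pv_contains_eq_any]; simp)
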